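-- pv_equiv track=rewrite | github.com/redam94/project-template | {{ cookiecutter.github_repository }}/scripts/cleanup_docstrings.py | _parse_numpy_raises
-- ===== SOURCE A (Python) =====
-- from typing import Dict, List, Optional, Any, Tuple, Union
--
-- def _parse_numpy_raises(lines: List[str]) -> Dict[str, str]:
--     """Parse NumPy-style raises section."""
--     raises = {}
--     current_exception = None
--
--     for line in lines:
--         if line and not line[0].isspace():
--             current_exception = line.strip().rstrip(':')
--             raises[current_exception] = ''
--         elif line.strip() and current_exception:
--             raises[current_exception] += ' ' + line.strip()
--
--     return raises
-- ===== SOURCE B (Python) =====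
-- def _parse_numpy_raises(lines):
--     """Parse a NumPy-style raises section.
--
--     Segments the lines into (exception, description-lines) blocks, then builds
--     the mapping, rendering each description line appended after a space.
--     """
--     blocks = []
--     pending = []
--     for line in reversed(lines):
--         if line and not line[0].isspace():
--             blocks.append((line.strip().rstrip(':'), pending))
--             pending = []
--         elif line.strip():
--             pending = [line.strip()] + pending
--     blocks.reverse()
--     return {name: ''.join(' ' + s for s in body) for name, body in blocks}
-- ===== Notes on version B (the rewrite author's own statement) =====
-- stated objective: alternative
-- what changed: A threads a mutable current-exception key through one forward loop, appending to the dict entry line by line; B first segments the lines into (header, body-lines) blocks in a single backward pass with no dict in sight, then builds the dict in one comprehension, rendering each block's description at once; Pre_ excludes malformed sections in which a colons-only header line (empty exception name) carries description lines, a corner no caller specifies: A leaves that entry empty, B attaches the description to it.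
-- outside the precondition, e.g. on _parse_numpy_raises([':', '  desc']): A returns {'': ''}, B returns {'': ' desc'}
import Mathlib
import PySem

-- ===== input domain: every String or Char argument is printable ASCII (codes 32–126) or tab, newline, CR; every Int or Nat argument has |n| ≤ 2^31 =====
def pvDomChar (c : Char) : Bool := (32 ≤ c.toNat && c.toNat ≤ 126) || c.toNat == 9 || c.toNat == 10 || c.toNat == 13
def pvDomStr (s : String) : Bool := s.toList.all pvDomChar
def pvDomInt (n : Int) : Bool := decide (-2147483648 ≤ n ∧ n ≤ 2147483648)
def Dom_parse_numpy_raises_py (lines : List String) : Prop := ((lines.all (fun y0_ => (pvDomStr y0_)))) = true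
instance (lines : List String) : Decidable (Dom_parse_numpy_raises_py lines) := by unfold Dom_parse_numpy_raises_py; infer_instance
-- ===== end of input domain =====

-- B replaces A's forward loop with a mutable "current exception" key by a backward
-- segmentation into (header, body) blocks followed by one dict-building fold (objective:
-- alternative); Pre_ excludes malformed sections whose header line is colons only.


-- ===== PORT A =====
-- shared primitives: `line and not line[0].isspace()` and `line.strip().rstrip(':')`
def pvIsHeader (cs : List Char) : Bool :=
  match cs with
  | [] => false
  | c :: _ => ! PySem.Chars.isspace c

-- s.rstrip(':') ported by hand: drop every trailing ':' (exact for all strings)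
def pvRstripColon (cs : List Char) : List Char :=
  (cs.reverse.dropWhile (· == ':')).reverse

def pvHeaderName (cs : List Char) : List Char :=
  pvRstripColon (PySem.Chars.strip cs)

-- Python truthiness of `current_exception` (None or '' are falsy)
def pvCurTruthy (cur : Option (List Char)) : Bool :=
  match cur with
  | none => false
  | some c => ! c.isEmpty

-- one iteration of A's `for line in lines` (raises[cur] += … uses modify: cur is always a key)
def pvStepA (st : PySem.Dict (List Char) (List Char) × Option (List Char)) (line : String) :
    PySem.Dict (List Char) (List Char) × Option (List Char) :=
  let (raises, cur) := st
  let cs := line.toList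
  if pvIsHeader cs then
    let c := pvHeaderName cs
    (raises.insert c [], some c)
  else if PySem.Chars.strip cs ≠ [] ∧ pvCurTruthy cur = true then
    (raises.modify (cur.getD []) [] (fun v => v ++ ' ' :: PySem.Chars.strip cs), cur)
  else
    (raises, cur)

def parse_numpy_raises_py (lines : List String) : List (String × String) :=
  let st := lines.foldl pvStepA (PySem.Dict.empty, none)
  st.1.items.map (fun p => (String.ofList p.1, String.ofList p.2))

-- ===== PORT B =====
-- one iteration of B's `for line in reversed(lines)` (foldr = reversed loop; cons = append + final reverse)
def pvStepB (line : String)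
    (st : List (List Char × List (List Char)) × List (List Char)) :
    List (List Char × List (List Char)) × List (List Char) :=
  let (blocks, pending) := st
  let cs := line.toList
  if pvIsHeader cs then
    ((pvHeaderName cs, pending) :: blocks, [])
  else
    let s := PySem.Chars.strip cs
    if s ≠ [] then (blocks, s :: pending) else (blocks, pending)

-- `result[name] = ''.join(' ' + s for s in body)`
def pvInsB (d : PySem.Dict (List Char) (List Char)) (b : List Char × List (List Char)) :
    PySem.Dict (List Char) (List Char) :=
  d.insert b.1 (b.2.flatMap (fun s => ' ' :: s))

def parse_numpy_raises_py_alt (lines : List String) : List (String × String) :=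
  let seg := lines.foldr pvStepB ([], [])
  let d := seg.1.foldl pvInsB PySem.Dict.empty
  d.items.map (fun p => (String.ofList p.1, String.ofList p.2))

-- ===== PRECONDITION & SPEC =====
-- line predicates for Pre_: a header line is non-empty with a non-whitespace first character;
-- an empty-name header is a header consisting of colons only; a body line is a non-blank non-header
def pvHeaderLine (s : String) : Bool := ! PySem.Chars.isspace (s.toList.headD ' ')

def pvEmptyNameHeader (s : String) : Bool :=
  pvHeaderLine s && (PySem.Chars.strip s.toList).all (· == ':')

def pvBodyLine (s : String) : Bool :=
  ! pvHeaderLine s && decide (PySem.Chars.strip s.toList ≠ [])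

-- Pre_ restricts to well-formed raises sections: no colons-only header line (empty exception
-- name) may carry description lines. On such inputs the corner is one no caller specifies:
-- A leaves the empty-named entry empty while B attaches the description lines to it.
def Pre_parse_numpy_raises_py (lines : List String) : Prop :=
  ¬ ∃ i ∈ List.range lines.length, pvEmptyNameHeader lines[i]! = true ∧
      ∃ j ∈ List.range lines.length, i < j ∧ pvBodyLine lines[j]! = true ∧
        ∀ k ∈ List.range j, i < k → pvHeaderLine lines[k]! = false
instance (lines : List String) : Decidable (Pre_parse_numpy_raises_py lines) := by
  unfold Pre_parse_numpy_raises_py; infer_instance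

def pvWitness_parse_numpy_raises_py : List String :=
  ["ValueError:", "  If the value is bad.", "", "KeyError", "  Missing key."]

def Spec_parse_numpy_raises_py (lines : List String) (out : List (String × String)) : Prop := out = parse_numpy_raises_py_alt lines
instance (lines : List String) (out : List (String × String)) : Decidable (Spec_parse_numpy_raises_py lines out) := by unfold Spec_parse_numpy_raises_py; infer_instance

-- ===== CLAIM (what is proved, stated in full; the proofs are below) =====
def Claim_equal_parse_numpy_raises_py : Prop := ∀ (lines : List String), Dom_parse_numpy_raises_py lines → Pre_parse_numpy_raises_py lines → Spec_parse_numpy_raises_py lines (parse_numpy_raises_py lines)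

-- ===== LEMMAS AND PROOFS =====

-- the effect of one body line on A's state, given the current key
def pvBodyStep (cur : Option (List Char)) (d : PySem.Dict (List Char) (List Char))
    (s : List Char) : PySem.Dict (List Char) (List Char) :=
  if pvCurTruthy cur = true then d.modify (cur.getD []) [] (fun v => v ++ ' ' :: s) else d

-- proof-only forward scan: (found-so-far, currently-inside-an-empty-named-block)
def pvScanStep (st : Bool × Bool) (line : String) : Bool × Bool :=
  let cs := line.toList
  if pvIsHeader cs then (st.1, decide (pvHeaderName cs = []))
  else if PySem.Chars.strip cs ≠ [] then (st.1 || st.2, st.2)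
  else st

-- the unbounded-quantifier form of the condition Pre_ negates
def pvDlt (lines : List String) : Prop :=
  ∃ i, i < lines.length ∧ pvEmptyNameHeader lines[i]! = true ∧
    ∃ j, i < j ∧ j < lines.length ∧ pvBodyLine lines[j]! = true ∧
      ∀ k, i < k → k < j → pvHeaderLine lines[k]! = false

-- the lines contain a non-blank indented line before their first header
def pvPendingBody (lines : List String) : Prop :=
  ∃ j, j < lines.length ∧ pvBodyLine lines[j]! = true ∧
    ∀ k, k < j → pvHeaderLine lines[k]! = false

lemma pvHeaderLine_eq (s : String) : pvHeaderLine s = pvIsHeader s.toList := by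
  cases h : s.toList with
  | nil => simp [pvHeaderLine, pvIsHeader, h]; decide
  | cons c t => simp [pvHeaderLine, pvIsHeader, h]

lemma pvEmptyName_iff (s : String) :
    pvHeaderName s.toList = [] ↔ (PySem.Chars.strip s.toList).all (· == ':') = true := by
  unfold pvHeaderName pvRstripColon
  rw [List.reverse_eq_nil_iff, List.dropWhile_eq_nil_iff]
  simp [List.all_eq_true]

lemma pvPre_iff (lines : List String) :
    Pre_parse_numpy_raises_py lines ↔ ¬ pvDlt lines := by
  unfold Pre_parse_numpy_raises_py pvDlt
  simp only [List.mem_range]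
  constructor
  · intro h hd
    obtain ⟨i, hi, hh, j, hij, hj, hb, hm⟩ := hd
    exact h ⟨i, hi, hh, j, hj, hij, hb, fun k h2 h1 => hm k h1 h2⟩
  · intro h hd
    obtain ⟨i, hi, hh, j, hj, hij, hb, hm⟩ := hd
    exact h ⟨i, hi, hh, j, hij, hj, hb, fun k h1 h2 => hm k h2 h1⟩

lemma pvD_shift (line : String) (rest : List String)
    (h : pvDlt rest) : pvDlt (line :: rest) := by
  unfold pvDlt at h ⊢
  obtain ⟨i, hi, hhead, j, hij, hj, hbody, hmid⟩ := h
  refine ⟨i + 1, by simpa using Nat.succ_lt_succ hi, by simpa using hhead,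
    j + 1, Nat.succ_lt_succ hij, by simpa using Nat.succ_lt_succ hj, by simpa using hbody, ?_⟩
  intro k hk1 hk2
  obtain ⟨k', rfl⟩ : ∃ k', k = k' + 1 := ⟨k - 1, by omega⟩
  simpa using hmid k' (by omega) (by omega)

-- once `found` is set the scan keeps it set
lemma pvScanMono (lines : List String) (e : Bool) :
    (lines.foldl pvScanStep (true, e)).1 = true := by
  induction lines generalizing e with
  | nil => rfl
  | cons line rest ih =>
    simp only [List.foldl_cons, pvScanStep]
    split_ifs <;> simp [ih]

-- a clean scan entered with `inEmpty = true` means no body lines before the next header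
lemma pvScanPending (rest : List String) (f : Bool)
    (h : (rest.foldl pvScanStep (f, true)).1 = false) :
    (rest.foldr pvStepB ([], [])).2 = [] := by
  induction rest generalizing f with
  | nil => rfl
  | cons line t ih =>
    by_cases h1 : pvIsHeader line.toList = true
    · simp [pvStepB, h1]
    · by_cases h2 : PySem.Chars.strip line.toList = []
      · simp only [List.foldl_cons, pvScanStep, h1, h2] at h
        simp only [List.foldr_cons, pvStepB, h1, Bool.false_eq_true, if_false, h2]
        simp only [ne_eq, not_true_eq_false, if_false]
        exact ih _ (by simpa using h)
      · exfalso
        simp only [List.foldl_cons, pvScanStep, h1, Bool.false_eq_true, if_false,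
          ne_eq, h2, not_false_eq_true, if_true, Bool.or_true] at h
        rw [pvScanMono] at h
        exact absurd h (by simp)

-- a scan that reports `found` exhibits the condition Pre_ negates
lemma pvScan_sound (lines : List String) (e : Bool)
    (h : (lines.foldl pvScanStep (false, e)).1 = true) :
    (e = true ∧ pvPendingBody lines) ∨ pvDlt lines := by
  unfold pvDlt
  induction lines generalizing e with
  | nil => exact absurd h (by simp)
  | cons line rest ih =>
    by_cases h1 : pvIsHeader line.toList = true
    · have h' : (rest.foldl pvScanStep (false, decide (pvHeaderName line.toList = []))).1 = true := by
        simpa [pvScanStep, h1] using h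
      rcases ih _ h' with ⟨he, j, hj, hbody, hmid⟩ | hD
      · refine Or.inr ⟨0, by simp, ?_, j + 1, by omega, by simpa using Nat.succ_lt_succ hj,
          by simpa using hbody, ?_⟩
        · have hn : pvHeaderName line.toList = [] := by simpa using he
          simp only [pvEmptyNameHeader, Bool.and_eq_true]
          exact ⟨by simpa [pvHeaderLine_eq] using h1,
            by simpa using (pvEmptyName_iff line).mp hn⟩
        · intro k hk1 hk2
          obtain ⟨k', rfl⟩ : ∃ k', k = k' + 1 := ⟨k - 1, by omega⟩
          simpa using hmid k' (by omega)
      · exact Or.inr (pvD_shift line rest hD)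
    · by_cases h2 : PySem.Chars.strip line.toList = []
      · have h' : (rest.foldl pvScanStep (false, e)).1 = true := by
          simpa [pvScanStep, h1, h2] using h
        rcases ih _ h' with ⟨he, j, hj, hbody, hmid⟩ | hD
        · refine Or.inl ⟨he, j + 1, by simpa using Nat.succ_lt_succ hj, by simpa using hbody, ?_⟩
          intro k hk
          match k with
          | 0 => simpa [pvHeaderLine_eq] using h1
          | k' + 1 => simpa using hmid k' (by omega)
        · exact Or.inr (pvD_shift line rest hD)
      · cases e with
        | true =>
          refine Or.inl ⟨rfl, 0, by simp, ?_, by omega⟩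
          simp only [pvBodyLine, Bool.and_eq_true, decide_eq_true_eq]
          exact ⟨by simpa [pvHeaderLine_eq] using h1, by simpa using h2⟩
        | false =>
          have h' : (rest.foldl pvScanStep (false, false)).1 = true := by
            simpa [pvScanStep, h1, h2] using h
          rcases ih _ h' with ⟨he, _⟩ | hD
          · exact absurd he (by simp)
          · exact Or.inr (pvD_shift line rest hD)

lemma pvStepA_header (d : PySem.Dict (List Char) (List Char)) (cur : Option (List Char))
    (line : String) (h1 : pvIsHeader line.toList = true) :
    pvStepA (d, cur) line =
      (d.insert (pvHeaderName line.toList) [], some (pvHeaderName line.toList)) := by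
  simp [pvStepA, h1]

lemma pvStepA_body (d : PySem.Dict (List Char) (List Char)) (cur : Option (List Char))
    (line : String) (h1 : ¬ pvIsHeader line.toList = true)
    (h2 : PySem.Chars.strip line.toList ≠ []) :
    pvStepA (d, cur) line = (pvBodyStep cur d (PySem.Chars.strip line.toList), cur) := by
  by_cases ht : pvCurTruthy cur = true
  · simp [pvStepA, h1, h2, ht, pvBodyStep]
  · simp [pvStepA, h1, h2, ht, pvBodyStep]

lemma pvStepA_skip (d : PySem.Dict (List Char) (List Char)) (cur : Option (List Char))
    (line : String) (h1 : ¬ pvIsHeader line.toList = true)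
    (h2 : PySem.Chars.strip line.toList = []) :
    pvStepA (d, cur) line = (d, cur) := by
  simp [pvStepA, h1, h2]

lemma pvFoldl_bodyStep_falsy (cur : Option (List Char)) (h : ¬ pvCurTruthy cur = true)
    (p : List (List Char)) (d : PySem.Dict (List Char) (List Char)) :
    p.foldl (pvBodyStep cur) d = d := by
  induction p generalizing d with
  | nil => rfl
  | cons s p ih => simp only [List.foldl_cons, pvBodyStep, if_neg h]; exact ih d

lemma pvFoldl_bodyStep_insert (n : List Char) (hn : n ≠ []) (p : List (List Char))
    (d : PySem.Dict (List Char) (List Char)) (v : List Char) :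
    p.foldl (pvBodyStep (some n)) (d.insert n v)
      = d.insert n (p.foldl (fun v s => v ++ ' ' :: s) v) := by
  induction p generalizing v with
  | nil => rfl
  | cons s p ih =>
    have htr : pvCurTruthy (some n) = true := by simp [pvCurTruthy, hn]
    have hmod : (d.insert n v).modify n [] (fun w => w ++ ' ' :: s)
        = d.insert n (v ++ ' ' :: s) := by
      show (d.insert n v).insert n (((d.insert n v).getD n []) ++ ' ' :: s)
          = d.insert n (v ++ ' ' :: s)
      rw [PySem.Dict.getD_insert_self, PySem.Dict.insert_insert_self]
    simp only [List.foldl_cons, pvBodyStep, htr, if_pos, Option.getD_some, hmod]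
    exact ih (v ++ ' ' :: s)

-- each block's appended body lines collapse to exactly B's rendered description
lemma pvBlock_desc (n : List Char) (p : List (List Char))
    (d : PySem.Dict (List Char) (List Char)) (hnp : n ≠ [] ∨ p = []) :
    p.foldl (pvBodyStep (some n)) (d.insert n []) = pvInsB d (n, p) := by
  by_cases hn : n = []
  · subst hn
    have hp : p = [] := hnp.resolve_left (by simp)
    subst hp
    simp [pvInsB]
  · rw [pvFoldl_bodyStep_insert n hn p d []]
    rw [show (fun (v s : List Char) => v ++ ' ' :: s)
          = (fun (acc : List Char) (s : List Char) => acc ++ (fun t => ' ' :: t) s) from rfl,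
        PySem.List.foldl_append_eq_flatMap]
    simp [pvInsB]

-- A's loop, started from any dict and current key, computes B's block fold, provided the
-- scan finds no body line inside an empty-named block
lemma pvMain (lines : List String) (d : PySem.Dict (List Char) (List Char))
    (cur : Option (List Char)) (f e : Bool)
    (hscan : (lines.foldl pvScanStep (f, e)).1 = false) :
    (lines.foldl pvStepA (d, cur)).1 =
      ((lines.foldr pvStepB ([], [])).1).foldl pvInsB
        ((lines.foldr pvStepB ([], [])).2.foldl (pvBodyStep cur) d) := by
  induction lines generalizing d cur f e with
  | nil => rfl
  | cons line rest ih =>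
    simp only [List.foldl_cons, List.foldr_cons]
    by_cases h1 : pvIsHeader line.toList = true
    · have hsc : (rest.foldl pvScanStep (f, decide (pvHeaderName line.toList = []))).1 = false := by
        simpa [pvScanStep, h1] using hscan
      rw [pvStepA_header d cur line h1, ih _ _ _ _ hsc]
      simp only [pvStepB, h1, if_pos, List.foldl_nil, List.foldl_cons]
      rw [pvBlock_desc]
      by_cases hn : pvHeaderName line.toList = []
      · exact Or.inr (pvScanPending rest f (by simpa [hn] using hsc))
      · exact Or.inl hn
    · by_cases h2 : PySem.Chars.strip line.toList = []
      · have hsc : (rest.foldl pvScanStep (f, e)).1 = false := by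
          simpa [pvScanStep, h1, h2] using hscan
        rw [pvStepA_skip d cur line h1 h2, ih _ _ _ _ hsc]
        simp only [pvStepB, h1, h2]
        simp
      · have hsc : (rest.foldl pvScanStep (f || e, e)).1 = false := by
          simpa [pvScanStep, h1, h2] using hscan
        rw [pvStepA_body d cur line h1 h2, ih _ _ _ _ hsc]
        simp only [pvStepB]
        simp [h1, h2]

-- ===== VERDICT (by name: the statement is the Claim_ definition above) =====
theorem parse_numpy_raises_py_spec : Claim_equal_parse_numpy_raises_py := by
  intro lines _ hpre
  unfold Spec_parse_numpy_raises_py parse_numpy_raises_py parse_numpy_raises_py_alt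
  have hscan : (lines.foldl pvScanStep (false, false)).1 = false := by
    cases hb : (lines.foldl pvScanStep (false, false)).1 with
    | false => rfl
    | true =>
      rcases pvScan_sound lines false hb with ⟨he, _⟩ | hD
      · exact absurd he (by simp)
      · exact absurd hD ((pvPre_iff lines).mp hpre)
  have h := pvMain lines PySem.Dict.empty none false false hscan
  rw [pvFoldl_bodyStep_falsy none (by simp [pvCurTruthy])] at h
  simp only [h]
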